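-- pv_equiv track=rewrite | github.com/Deepfea/AdvCLUE | method/step1_adv_sample_generation/CMRC2018/seg_data_to_words.py | discover_context_pos
-- ===== SOURCE A (Python) =====
-- def discover_context_pos(temp_string, word_list, answer_start, answer_end):
--     final_word_list = []
--     poi = []
--     num = 0
--     for i in range(len(word_list)):
--         temp_word = word_list[i]
--         index_start = int(temp_string.find(temp_word))
--         index_end = int(index_start + len(temp_word))
--         if index_end <= answer_start or index_start >= answer_end:
--             final_word_list.append(word_list[i])
--             poi.append([])
--             poi[num].append(index_start)
--             poi[num].append(index_end)
--             num += 1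
--     return final_word_list, poi
-- ===== SOURCE B (Python) =====
-- def discover_context_pos(temp_string, word_list, answer_start, answer_end):
--     # Sliding-window scan instead of one find() per entry: collect the distinct
--     # word lengths, then walk temp_string once, probing at each position i the
--     # window temp_string[i:i+L] for each length L against a hash set of the
--     # distinct words; the first position whose window hits a word is its first
--     # occurrence, words never hit get -1; then one filtering pass over word_list.
--     distinct = list(dict.fromkeys(word_list))
--     first = {w: 0 for w in distinct if not w}          # ''.find(...) == 0
--     wordset = {w for w in distinct if w}
--     lengths = sorted({len(w) for w in wordset})
--     for i in range(len(temp_string)):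
--         for L in lengths:
--             sub = temp_string[i:i + L]
--             if sub in wordset and sub not in first:
--                 first[sub] = i
--     for w in distinct:
--         if w not in first:
--             first[w] = -1
--     words, spans = [], []
--     for w in word_list:
--         s = first[w]
--         e = s + len(w)
--         if e <= answer_start or s >= answer_end:
--             words.append(w)
--             spans.append([s, e])
--     return words, spans
-- ===== Notes on version B (the rewrite author's own statement) =====
-- stated objective: faster
-- what changed: Instead of calling temp_string.find for every list entry, B walks temp_string once, probing at each position one hash-set window lookup per distinct word length to record each distinct word's first occurrence, then filters word_list in one pass over the recorded table.
import Mathlib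
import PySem

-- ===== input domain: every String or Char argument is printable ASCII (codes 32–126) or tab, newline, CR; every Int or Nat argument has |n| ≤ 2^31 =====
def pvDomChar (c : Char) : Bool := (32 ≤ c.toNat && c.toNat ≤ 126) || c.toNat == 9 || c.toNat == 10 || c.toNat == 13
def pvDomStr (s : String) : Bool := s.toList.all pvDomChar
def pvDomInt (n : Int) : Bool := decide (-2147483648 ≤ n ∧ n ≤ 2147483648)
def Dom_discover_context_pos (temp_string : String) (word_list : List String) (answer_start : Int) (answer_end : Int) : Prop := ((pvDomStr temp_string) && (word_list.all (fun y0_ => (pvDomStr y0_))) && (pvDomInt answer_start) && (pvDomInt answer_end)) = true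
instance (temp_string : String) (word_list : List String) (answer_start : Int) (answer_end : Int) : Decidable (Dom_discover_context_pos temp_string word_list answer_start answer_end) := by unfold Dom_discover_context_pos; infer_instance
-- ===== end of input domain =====

-- B replaces A's per-word find() by one sliding-window scan of temp_string (hash-set probes at each position, one per distinct word length); return values proved equal (no argument is mutated).

-- ===== PORT A =====
-- A's loop body: one step of the fold over word_list with state (final_word_list, poi, num)
def dcpStepA (temp_string : String) (answer_start answer_end : Int)
    (st : List String × List (List Int) × Int) (w : String) :
    List String × List (List Int) × Int :=
  let index_start := PySem.Str.find temp_string w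
  let index_end := index_start + PySem.Str.len w
  if index_end ≤ answer_start ∨ index_start ≥ answer_end then
    (st.1 ++ [w], st.2.1 ++ [[index_start, index_end]], st.2.2 + 1)
  else st

def discover_context_pos (temp_string : String) (word_list : List String) (answer_start : Int) (answer_end : Int) : List String × List (List Int) :=
  let r := word_list.foldl (dcpStepA temp_string answer_start answer_end) ([], [], 0)
  (r.1, r.2.1)

-- ===== PORT B =====
-- B's inner loop body: probe the window temp_string[i:i+L] against the word set
def dcpInner (temp_string : String) (wordset : PySem.Set String) (i : Nat)
    (f : PySem.Dict String Int) (L : Int) : PySem.Dict String Int :=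
  let sub := PySem.Str.slice temp_string (some (i : Int)) (some ((i : Int) + L))
  if PySem.Set.contains wordset sub && !(f.contains sub) then f.insert sub (i : Int) else f

-- B's outer loop: for i in range(len(temp_string)) (fuel = positions left)
def dcpScanW (temp_string : String) (wordset : PySem.Set String) (lengths : List Int) :
    Nat → Nat → PySem.Dict String Int → PySem.Dict String Int
  | _, 0, f => f
  | i, fuel + 1, f =>
    dcpScanW temp_string wordset lengths (i + 1) fuel
      (lengths.foldl (dcpInner temp_string wordset i) f)

-- B's third loop: distinct words never hit get -1
def dcpFinish (distinct : List String) (f : PySem.Dict String Int) : PySem.Dict String Int :=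
  distinct.foldl (fun f w => if f.contains w then f else f.insert w (-1)) f

-- B's last loop: filter word_list by the recorded first occurrence
def dcpStepB (first : PySem.Dict String Int) (answer_start answer_end : Int)
    (acc : List String × List (List Int)) (w : String) : List String × List (List Int) :=
  let s := first.getD w 0
  let e := s + PySem.Str.len w
  if e ≤ answer_start ∨ s ≥ answer_end then (acc.1 ++ [w], acc.2 ++ [[s, e]]) else acc

def discover_context_pos_alt (temp_string : String) (word_list : List String) (answer_start : Int) (answer_end : Int) : List String × List (List Int) :=
  let distinct := PySem.List.dedup word_list
  let first0 := (distinct.filter (fun w => w == "")).foldl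
    (fun d w => d.insert w 0) PySem.Dict.empty
  let wordset := PySem.Set.ofList (distinct.filter (fun w => !(w == "")))
  let lengths := PySem.List.sorted (PySem.Set.ofList (wordset.map PySem.Str.len)) (fun x => x) false
  let first := dcpScanW temp_string wordset lengths 0 temp_string.toList.length first0
  let first2 := dcpFinish distinct first
  word_list.foldl (dcpStepB first2 answer_start answer_end) ([], [])

-- ===== PRECONDITION & SPEC =====
def Spec_discover_context_pos (temp_string : String) (word_list : List String) (answer_start : Int) (answer_end : Int) (out : List String × List (List Int)) : Prop := out = discover_context_pos_alt temp_string word_list answer_start answer_end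
instance (temp_string : String) (word_list : List String) (answer_start : Int) (answer_end : Int) (out : List String × List (List Int)) : Decidable (Spec_discover_context_pos temp_string word_list answer_start answer_end out) := by unfold Spec_discover_context_pos; infer_instance

-- ===== CLAIM (what is proved, stated in full; the proofs are below) =====
def Claim_equal_discover_context_pos : Prop := ∀ (temp_string : String) (word_list : List String) (answer_start : Int) (answer_end : Int), Dom_discover_context_pos temp_string word_list answer_start answer_end → Spec_discover_context_pos temp_string word_list answer_start answer_end (discover_context_pos temp_string word_list answer_start answer_end)

-- ===== LEMMAS AND PROOFS =====

-- find l sub = k when sub starts at k and at no earlier position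
lemma dcp_find_eq_of (l sub : List Char) (k : Nat) (hk : sub <+: l.drop k)
    (hmin : ∀ j, j < k → ¬ sub <+: l.drop j) : PySem.Chars.find l sub = (k : Int) := by
  have hinf : sub <:+: l := by
    have := (PySem.Chars.exists_prefix_drop_iff_isIn sub l).mp ⟨k, hk⟩
    exact (PySem.Chars.isIn_iff_infix sub l).mp this
  have hnn : (0 : Int) ≤ PySem.Chars.find l sub := (PySem.Chars.find_nonneg_iff l sub).mpr hinf
  obtain ⟨hpre, hm⟩ := PySem.Chars.find_spec hnn
  rcases lt_trichotomy (PySem.Chars.find l sub).toNat k with h | h | h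
  · exact absurd hpre (hmin _ h)
  · omega
  · exact absurd hk (hm k h)

-- stepping the scan one character: if sub does not start right here, its find on the
-- one-shorter suffix determines its find on this suffix
lemma dcp_find_cons (ch : Char) (r sub : List Char) (h : ¬ sub <+: ch :: r) :
    (PySem.Chars.find (ch :: r) sub = -1 ↔ PySem.Chars.find r sub = -1) ∧
    (PySem.Chars.find r sub ≠ -1 →
      PySem.Chars.find (ch :: r) sub = 1 + PySem.Chars.find r sub) := by
  constructor
  · rw [PySem.Chars.find_eq_neg_one_iff, PySem.Chars.find_eq_neg_one_iff]
    constructor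
    · intro h1 h2
      exact h1 (h2.trans (List.suffix_cons ch r).isInfix)
    · intro h1 h2
      apply h1
      rcases h2 with ⟨pre, suf, he⟩
      rcases pre with _ | ⟨c0, pre'⟩
      · exact absurd ⟨suf, by simpa using he⟩ h
      · obtain ⟨-, he2⟩ : c0 = ch ∧ pre' ++ (sub ++ suf) = r := by simpa using he
        exact ⟨pre', suf, by rw [List.append_assoc]; exact he2⟩
  · intro hne
    have hnn : (0 : Int) ≤ PySem.Chars.find r sub := by
      have := PySem.Chars.neg_one_le_find r sub
      omega
    obtain ⟨hpre, hmin⟩ := PySem.Chars.find_spec hnn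
    set f := (PySem.Chars.find r sub).toNat with hfdef
    have : PySem.Chars.find (ch :: r) sub = ((f + 1 : Nat) : Int) := by
      apply dcp_find_eq_of
      · simpa using hpre
      · intro j hj
        cases j with
        | zero => simpa using h
        | succ j' => simpa using hmin j' (by omega)
    rw [this]
    omega

-- getD/contains through a fold of inserts of OTHER keys is unchanged
lemma dcp_foldl_insert_not_mem (l : List String) (v : Int) (w : String) (hw : w ∉ l) :
    ∀ d : PySem.Dict String Int,
      (l.foldl (fun d x => d.insert x v) d).getD w 0 = d.getD w 0 ∧
      (l.foldl (fun d x => d.insert x v) d).contains w = d.contains w := by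
  induction l with
  | nil => intro d; exact ⟨rfl, rfl⟩
  | cons x xs ih =>
    intro d
    have hwx : w ≠ x := fun h => hw (h ▸ List.mem_cons_self ..)
    have hxs : w ∉ xs := fun h => hw (List.mem_cons_of_mem _ h)
    simp only [List.foldl_cons]
    obtain ⟨h1, h2⟩ := ih hxs (d.insert x v)
    refine ⟨?_, ?_⟩
    · rw [h1, PySem.Dict.getD_insert]; simp [hwx]
    · rw [h2, PySem.Dict.contains_insert]; simp [hwx]

-- getD/contains after a fold of inserts all carrying value v, for a member key
lemma dcp_foldl_insert_mem (l : List String) (v : Int) (w : String) (hw : w ∈ l) :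
    ∀ d : PySem.Dict String Int,
      (l.foldl (fun d x => d.insert x v) d).getD w 0 = v ∧
      (l.foldl (fun d x => d.insert x v) d).contains w = true := by
  induction l with
  | nil => cases hw
  | cons x xs ih =>
    intro d
    by_cases hm : w ∈ xs
    · simpa using ih hm (d.insert x v)
    · have hwx : w = x := by rcases List.mem_cons.mp hw with h | h; exact h; exact absurd h hm
      simp only [List.foldl_cons]
      obtain ⟨h1, h2⟩ := dcp_foldl_insert_not_mem xs v w hm (d.insert x v)
      refine ⟨?_, ?_⟩
      · rw [h1, PySem.Dict.getD_insert]; simp [hwx]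
      · rw [h2, PySem.Dict.contains_insert]; simp [hwx]

-- the window temp_string[i:i+L] equals w iff w is the L-truncated prefix of the suffix at i
lemma dcp_slice_eq (temp_string w : String) (i : Nat) (L : Int) (hL : 0 ≤ L) :
    (PySem.Str.slice temp_string (some (i : Int)) (some ((i : Int) + L)) = w) ↔
    w.toList = (temp_string.toList.drop i).take L.toNat := by
  rw [String.ext_iff]
  have hbridge : (PySem.Str.slice temp_string (some (i : Int)) (some ((i : Int) + L))).toList
      = PySem.List.slice temp_string.toList (some (i : Int)) (some ((i : Int) + L)) :=
    Eq.symm ((fun {l} {s} => String.ofList_eq.mp) rfl)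
  rw [hbridge]
  rw [PySem.List.slice_toNat]
  have h2 : ((i : Int) + L).toNat - ((i : Int)).toNat = L.toNat := by omega
  simp only [Int.toNat_natCast] at h2 ⊢
  rw [h2]
  exact eq_comm
  all_goals omega

-- the inner loop leaves key w alone when w is already recorded or no window hits it
lemma dcp_inner_pres (temp_string : String) (wordset : PySem.Set String) (i : Nat)
    (w : String) :
    ∀ (Ls : List Int) (f : PySem.Dict String Int),
      (f.contains w = true ∨ ∀ L ∈ Ls,
        PySem.Str.slice temp_string (some (i : Int)) (some ((i : Int) + L)) ≠ w) →
      (Ls.foldl (dcpInner temp_string wordset i) f).getD w 0 = f.getD w 0 ∧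
      (Ls.foldl (dcpInner temp_string wordset i) f).contains w = f.contains w := by
  intro Ls
  induction Ls with
  | nil => intro f _; exact ⟨rfl, rfl⟩
  | cons L Ls ih =>
    intro f h
    simp only [List.foldl_cons]
    set sub := PySem.Str.slice temp_string (some (i : Int)) (some ((i : Int) + L)) with hsub
    have hstep : dcpInner temp_string wordset i f L =
        (if (PySem.Set.contains wordset sub && !(f.contains sub)) = true
         then f.insert sub (i : Int) else f) := rfl
    by_cases hsw : sub = w
    · -- the window is w itself: by hypothesis w is already recorded, so the guard blocks
      have hcw : f.contains w = true := by
        rcases h with h | h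
        · exact h
        · exact absurd hsw (h L (List.mem_cons_self ..))
      have hid : dcpInner temp_string wordset i f L = f := by
        rw [hstep, hsw, hcw]
        simp
      rw [hid]
      apply ih
      rcases h with h | h
      · exact Or.inl h
      · exact Or.inr (fun L' hL' => h L' (List.mem_cons_of_mem _ hL'))
    · -- a different window: any insert is of a different key
      have hws' : w ≠ sub := fun hx => hsw hx.symm
      have hpr : (dcpInner temp_string wordset i f L).getD w 0 = f.getD w 0 ∧
          (dcpInner temp_string wordset i f L).contains w = f.contains w := by
        rw [hstep]
        by_cases hg : (PySem.Set.contains wordset sub && !(f.contains sub)) = true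
        · rw [if_pos hg, PySem.Dict.getD_insert, PySem.Dict.contains_insert]
          simp [hws']
        · rw [if_neg hg]; exact ⟨rfl, rfl⟩
      obtain ⟨h1, h2⟩ := ih (dcpInner temp_string wordset i f L)
        (by rcases h with h | h
            · exact Or.inl (by rw [hpr.2]; exact h)
            · exact Or.inr (fun L' hL' => h L' (List.mem_cons_of_mem _ hL')))
      rw [h1, h2, hpr.1, hpr.2]
      exact ⟨rfl, rfl⟩

-- the inner loop records an unrecorded set word at i as soon as some window hits it
lemma dcp_inner_hit (temp_string : String) (wordset : PySem.Set String) (i : Nat)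
    (w : String) (hws : PySem.Set.contains wordset w = true) :
    ∀ (Ls : List Int) (f : PySem.Dict String Int), f.contains w = false →
      (∃ L ∈ Ls, PySem.Str.slice temp_string (some (i : Int)) (some ((i : Int) + L)) = w) →
      (Ls.foldl (dcpInner temp_string wordset i) f).getD w 0 = (i : Int) ∧
      (Ls.foldl (dcpInner temp_string wordset i) f).contains w = true := by
  intro Ls
  induction Ls with
  | nil => intro f _ h; obtain ⟨L, hL, _⟩ := h; cases hL
  | cons L Ls ih =>
    intro f hcf hex
    simp only [List.foldl_cons]
    set sub := PySem.Str.slice temp_string (some (i : Int)) (some ((i : Int) + L)) with hsub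
    have hstep : dcpInner temp_string wordset i f L =
        (if (PySem.Set.contains wordset sub && !(f.contains sub)) = true
         then f.insert sub (i : Int) else f) := rfl
    by_cases hsw : sub = w
    · -- this window hits: insert, then everything is preserved
      have hins : dcpInner temp_string wordset i f L = f.insert w (i : Int) := by
        rw [hstep, hsw, hws, hcf]
        simp
      rw [hins]
      obtain ⟨h1, h2⟩ := dcp_inner_pres temp_string wordset i w Ls (f.insert w (i : Int))
        (Or.inl (by rw [PySem.Dict.contains_insert]; simp))
      rw [h1, h2, PySem.Dict.getD_insert, PySem.Dict.contains_insert]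
      simp
    · -- not this window: w stays unrecorded, a later length hits
      have hws' : w ≠ sub := fun hx => hsw hx.symm
      have hex' : ∃ L' ∈ Ls,
          PySem.Str.slice temp_string (some (i : Int)) (some ((i : Int) + L')) = w := by
        obtain ⟨L', hL', he⟩ := hex
        rcases List.mem_cons.mp hL' with rfl | hmem
        · exact absurd he hsw
        · exact ⟨L', hmem, he⟩
      have hcf' : (dcpInner temp_string wordset i f L).contains w = false := by
        rw [hstep]
        by_cases hg : (PySem.Set.contains wordset sub && !(f.contains sub)) = true
        · rw [if_pos hg, PySem.Dict.contains_insert]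
          simp [hws', hcf]
        · rw [if_neg hg]; exact hcf
      exact ih (dcpInner temp_string wordset i f L) hcf' hex'

-- an already-recorded word is never touched again by the outer scan
lemma dcp_scanW_pres (temp_string : String) (wordset : PySem.Set String) (lengths : List Int)
    (w : String) :
    ∀ (fuel i : Nat) (f : PySem.Dict String Int), f.contains w = true →
      (dcpScanW temp_string wordset lengths i fuel f).getD w 0 = f.getD w 0 ∧
      (dcpScanW temp_string wordset lengths i fuel f).contains w = f.contains w := by
  intro fuel
  induction fuel with
  | zero => intro i f _; exact ⟨rfl, rfl⟩
  | succ fuel ih =>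
    intro i f hc
    unfold dcpScanW
    obtain ⟨h1, h2⟩ := dcp_inner_pres temp_string wordset i w lengths f (Or.inl hc)
    obtain ⟨h3, h4⟩ := ih (i + 1) (lengths.foldl (dcpInner temp_string wordset i) f)
      (by rw [h2]; exact hc)
    exact ⟨by rw [h3, h1], by rw [h4, h2]⟩

-- the outer scan records for an unrecorded set word exactly the find of the remaining suffix
lemma dcp_scanW_w (temp_string : String) (wordset : PySem.Set String) (lengths : List Int)
    (w : String) (hwne : w.toList ≠ []) (hws : PySem.Set.contains wordset w = true)
    (hlen : (w.toList.length : Int) ∈ lengths) (hLs : ∀ L ∈ lengths, 0 ≤ L) :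
    ∀ (fuel i : Nat) (f : PySem.Dict String Int),
      i + fuel = temp_string.toList.length → f.contains w = false →
      (PySem.Chars.find (temp_string.toList.drop i) w.toList = -1 ∧
        (dcpScanW temp_string wordset lengths i fuel f).getD w 0 = f.getD w 0 ∧
        (dcpScanW temp_string wordset lengths i fuel f).contains w = false) ∨
      (PySem.Chars.find (temp_string.toList.drop i) w.toList ≠ -1 ∧
        (dcpScanW temp_string wordset lengths i fuel f).getD w 0 =
          (i : Int) + PySem.Chars.find (temp_string.toList.drop i) w.toList ∧
        (dcpScanW temp_string wordset lengths i fuel f).contains w = true) := by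
  intro fuel
  induction fuel with
  | zero =>
    intro i f hif hcf
    left
    refine ⟨?_, rfl, hcf⟩
    have hdrop : temp_string.toList.drop i = [] := List.drop_eq_nil_of_le (by omega)
    rw [hdrop]
    apply (PySem.Chars.find_eq_neg_one_iff _ _).mpr
    intro hinf
    exact hwne (List.eq_nil_of_infix_nil hinf)
  | succ fuel ih =>
    intro i f hif hcf
    have hilt : i < temp_string.toList.length := by omega
    have hdrop : temp_string.toList.drop i =
        temp_string.toList[i] :: temp_string.toList.drop (i + 1) :=
      List.drop_eq_getElem_cons hilt
    unfold dcpScanW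
    by_cases hpre : w.toList <+: temp_string.toList.drop i
    · -- w starts right here: the window of its own length hits
      have hhit : PySem.Str.slice temp_string (some (i : Int))
          (some ((i : Int) + (w.toList.length : Int))) = w := by
        rw [dcp_slice_eq temp_string w i _ (by omega)]
        have : ((w.toList.length : Int)).toNat = w.toList.length := by omega
        rw [this]
        exact List.prefix_iff_eq_take.mp hpre
      obtain ⟨h1, h2⟩ := dcp_inner_hit temp_string wordset i w hws lengths f hcf
        ⟨(w.toList.length : Int), hlen, hhit⟩
      obtain ⟨h3, h4⟩ := dcp_scanW_pres temp_string wordset lengths w fuel (i + 1)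
        (lengths.foldl (dcpInner temp_string wordset i) f) (by rw [h2])
      right
      have hfind : PySem.Chars.find (temp_string.toList.drop i) w.toList = 0 := by
        have := dcp_find_eq_of (temp_string.toList.drop i) w.toList 0 (by simpa using hpre)
          (by omega)
        simpa using this
      rw [hfind]
      refine ⟨by omega, ?_, by rw [h4, h2]⟩
      rw [h3, h1]
      simp
    · -- no window hits w here: recurse one position to the right
      have hnohit : ∀ L ∈ lengths,
          PySem.Str.slice temp_string (some (i : Int)) (some ((i : Int) + L)) ≠ w := by
        intro L hL he
        apply hpre
        rw [dcp_slice_eq temp_string w i L (hLs L hL)] at he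
        rw [he]
        exact List.take_prefix _ _
      obtain ⟨h1, h2⟩ := dcp_inner_pres temp_string wordset i w lengths f (Or.inr hnohit)
      obtain ⟨hiff, hval⟩ := dcp_find_cons temp_string.toList[i]
        (temp_string.toList.drop (i + 1)) w.toList (by rw [← hdrop]; exact hpre)
      rw [← hdrop] at hiff hval
      rcases ih (i + 1) (lengths.foldl (dcpInner temp_string wordset i) f) (by omega)
        (by rw [h2]; exact hcf) with ⟨hf1, hg1, hc1⟩ | ⟨hf1, hg1, hc1⟩
      · left
        exact ⟨hiff.mpr hf1, by rw [hg1, h1], hc1⟩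
      · right
        refine ⟨fun hx => hf1 (hiff.mp hx), ?_, hc1⟩
        rw [hg1, hval hf1]
        push_cast
        ring

-- the -1 pass: a listed word keeps its recorded value, or gets -1 if never recorded
lemma dcp_finish_not_mem (w : String) :
    ∀ (l : List String) (f : PySem.Dict String Int), w ∉ l →
      (dcpFinish l f).getD w 0 = f.getD w 0 := by
  intro l
  induction l with
  | nil => intro f _; rfl
  | cons x xs ih =>
    intro f hw
    have hwx : w ≠ x := fun h => hw (h ▸ List.mem_cons_self ..)
    have hxs : w ∉ xs := fun h => hw (List.mem_cons_of_mem _ h)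
    unfold dcpFinish at ih ⊢
    simp only [List.foldl_cons]
    rw [ih _ hxs]
    by_cases hc : f.contains x
    · simp [hc]
    · simp only [hc, Bool.false_eq_true, if_false]
      rw [PySem.Dict.getD_insert]
      simp [hwx]

lemma dcp_finish_getD (w : String) :
    ∀ (l : List String) (f : PySem.Dict String Int), w ∈ l →
      (dcpFinish l f).getD w 0 = if f.contains w then f.getD w 0 else -1 := by
  intro l
  induction l with
  | nil => intro _ h; cases h
  | cons x xs ih =>
    intro f hw
    unfold dcpFinish at ih ⊢
    simp only [List.foldl_cons]
    by_cases hmem : w ∈ xs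
    · rw [ih _ hmem]
      by_cases hwx : w = x
      · subst hwx
        by_cases hc : f.contains w
        · simp [hc]
        · simp only [hc, Bool.false_eq_true, if_false]
          rw [PySem.Dict.contains_insert, PySem.Dict.getD_insert]
          simp
      · by_cases hc : f.contains x
        · simp [hc]
        · simp only [hc, Bool.false_eq_true, if_false]
          rw [PySem.Dict.contains_insert, PySem.Dict.getD_insert]
          simp [hwx]
    · have hwx : w = x := by rcases List.mem_cons.mp hw with h | h; exact h; exact absurd h hmem
      subst hwx
      have hnm := dcp_finish_not_mem w xs (if f.contains w = true then f else f.insert w (-1)) hmem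
      unfold dcpFinish at hnm
      rw [hnm]
      by_cases hc : f.contains w
      · simp [hc]
      · simp only [hc, Bool.false_eq_true, if_false]
        rw [PySem.Dict.getD_insert]
        simp

-- for every word of word_list, B's table gives temp_string.find(word)
lemma dcp_first_eq_find (temp_string : String) (word_list : List String) (w : String)
    (hw : w ∈ word_list) :
    (dcpFinish (PySem.List.dedup word_list)
      (dcpScanW temp_string
        (PySem.Set.ofList ((PySem.List.dedup word_list).filter (fun w => !(w == ""))))
        (PySem.List.sorted (PySem.Set.ofList
          ((PySem.Set.ofList ((PySem.List.dedup word_list).filter (fun w => !(w == "")))).map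
            PySem.Str.len)) (fun x => x) false)
        0 temp_string.toList.length
        (((PySem.List.dedup word_list).filter (fun w => w == "")).foldl
          (fun d w => d.insert w 0) PySem.Dict.empty))).getD w 0 =
    PySem.Str.find temp_string w := by
  have hwd : w ∈ PySem.List.dedup word_list := (PySem.List.mem_dedup ..).mpr hw
  set distinct := PySem.List.dedup word_list with hdd
  set wordset := PySem.Set.ofList (distinct.filter (fun w => !(w == ""))) with hwsdef
  set lengths := PySem.List.sorted (PySem.Set.ofList (wordset.map PySem.Str.len))
    (fun x => x) false with hlsdef
  set first0 := ((distinct.filter (fun w => w == "")).foldl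
    (fun d w => d.insert w 0) PySem.Dict.empty : PySem.Dict String Int) with hf0def
  rw [PySem.Str.find_eq]
  by_cases hwe : w = ""
  · -- the empty word: recorded at 0 before the scan, untouched by it
    subst hwe
    have hmemf : ("" : String) ∈ distinct.filter (fun w => w == "") :=
      List.mem_filter.mpr ⟨hwd, by simp⟩
    obtain ⟨hg0, hc0⟩ := dcp_foldl_insert_mem _ 0 "" hmemf PySem.Dict.empty
    obtain ⟨hG, hC⟩ := dcp_scanW_pres temp_string wordset lengths ""
      temp_string.toList.length 0 first0 hc0
    rw [dcp_finish_getD _ distinct _ hwd, hC, hc0]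
    simp only [if_true]
    rw [hG, hg0]
    exact (PySem.Chars.find_nil temp_string.toList).symm
  · -- a nonempty word: in the word set, its length among the probed lengths
    have hwne : w.toList ≠ [] := by
      intro h
      exact hwe (String.ext_iff.mpr (by simpa using h))
    have hmemw : w ∈ distinct.filter (fun w => !(w == "")) :=
      List.mem_filter.mpr ⟨hwd, by simp [hwe]⟩
    have hws : PySem.Set.contains wordset w = true :=
      (PySem.Set.contains_iff ..).mpr ((PySem.Set.mem_ofList ..).mpr hmemw)
    have hlen : (w.toList.length : Int) ∈ lengths := by
      rw [hlsdef, PySem.List.mem_sorted]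
      apply (PySem.Set.mem_ofList ..).mpr
      apply List.mem_map.mpr
      refine ⟨w, (PySem.Set.mem_ofList ..).mpr hmemw, ?_⟩
      rw [PySem.Str.len_eq]
    have hLs : ∀ L ∈ lengths, 0 ≤ L := by
      intro L hL
      rw [hlsdef, PySem.List.mem_sorted] at hL
      obtain ⟨x, -, hx⟩ := List.mem_map.mp ((PySem.Set.mem_ofList ..).mp hL)
      rw [← hx, PySem.Str.len_eq]
      omega
    have hcf0 : first0.contains w = false := by
      have hnm : w ∉ distinct.filter (fun w => w == "") := by
        intro hx
        have := (List.mem_filter.mp hx).2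
        simp [hwe] at this
      rw [(dcp_foldl_insert_not_mem _ 0 w hnm PySem.Dict.empty).2]
      exact PySem.Dict.contains_empty w
    rcases dcp_scanW_w temp_string wordset lengths w hwne hws hlen hLs
      temp_string.toList.length 0 first0 (by omega) hcf0 with
      ⟨hf, hG, hC⟩ | ⟨hf, hG, hC⟩
    · rw [dcp_finish_getD w distinct _ hwd, hC]
      simp only [Bool.false_eq_true, if_false]
      rw [List.drop_zero] at hf
      omega
    · rw [dcp_finish_getD w distinct _ hwd, hC]
      simp only [if_true]
      rw [hG]
      rw [List.drop_zero] at hf ⊢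
      omega

-- the two folds agree when the table agrees with find on every word
lemma dcp_fold_agree (temp_string : String) (answer_start answer_end : Int)
    (first : PySem.Dict String Int) :
    ∀ (ws : List String) (l1 : List String) (l2 : List (List Int)) (n : Int),
      (∀ w ∈ ws, first.getD w 0 = PySem.Str.find temp_string w) →
      ((ws.foldl (dcpStepA temp_string answer_start answer_end) (l1, l2, n)).1,
       (ws.foldl (dcpStepA temp_string answer_start answer_end) (l1, l2, n)).2.1) =
      ws.foldl (dcpStepB first answer_start answer_end) (l1, l2) := by
  intro ws
  induction ws with
  | nil => intro l1 l2 n _; rfl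
  | cons w ws ih =>
    intro l1 l2 n hg
    have hgw : first.getD w 0 = PySem.Str.find temp_string w := hg w (List.mem_cons_self ..)
    have hg' : ∀ x ∈ ws, first.getD x 0 = PySem.Str.find temp_string x :=
      fun x hx => hg x (List.mem_cons_of_mem _ hx)
    simp only [List.foldl_cons, dcpStepA, dcpStepB, hgw]
    by_cases hc : PySem.Str.find temp_string w + PySem.Str.len w ≤ answer_start ∨
        PySem.Str.find temp_string w ≥ answer_end
    · simp only [hc, if_true]
      exact ih _ _ (n + 1) hg'
    · simp only [hc, if_false]
      exact ih _ _ n hg'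

-- ===== VERDICT (by name: the statement is the Claim_ definition above) =====
theorem discover_context_pos_spec : Claim_equal_discover_context_pos := by
  intro temp_string word_list answer_start answer_end _
  unfold Spec_discover_context_pos discover_context_pos discover_context_pos_alt
  exact dcp_fold_agree temp_string answer_start answer_end _ word_list [] [] 0
    (fun w hw => dcp_first_eq_find temp_string word_list w hw)
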